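-- pv_equiv track=rewrite | github.com/imvickykumar999/Inventory-Level | solution.py | solution
-- ===== SOURCE A (Python) =====
-- def solution(products, changes):
--     inventory = {}
--     res = []
--
--     for prod_id, change in zip(products, changes):
--         inventory[prod_id] = inventory.get(prod_id, 0) + change
--         max_current_qty = 0
--
--         for qty in inventory.values():
--             if qty > max_current_qty:
--                 max_current_qty = qty
--
--         res.append(max_current_qty)
--
--     return res
-- ===== SOURCE B (Python) =====
-- def _bisect_left(a, x):
--     lo, hi = 0, len(a)
--     while lo < hi:
--         mid = (lo + hi) // 2
--         if a[mid] < x: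
--             lo = mid + 1
--         else:
--             hi = mid
--     return lo
--
--
-- def solution(products, changes):
--     inventory = {}
--     sl = []          # sorted multiset of all current quantities
--     res = []
--     for pid, ch in zip(products, changes):
--         if pid in inventory:
--             old = inventory[pid]
--             sl.pop(_bisect_left(sl, old))
--             qty = old + ch
--         else:
--             qty = ch
--         inventory[pid] = qty
--         sl.insert(_bisect_left(sl, qty), qty)
--         top = sl[-1]
--         res.append(top if top > 0 else 0)
--     return res
-- ===== Notes on version B (the rewrite author's own statement) =====
-- stated objective: faster
-- what changed: Instead of rescanning every inventory value after each update, B maintains the current quantities as an incrementally updated sorted list (hand-written bisect_left + pop/insert) whose last element gives the running max directly.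
import Mathlib
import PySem

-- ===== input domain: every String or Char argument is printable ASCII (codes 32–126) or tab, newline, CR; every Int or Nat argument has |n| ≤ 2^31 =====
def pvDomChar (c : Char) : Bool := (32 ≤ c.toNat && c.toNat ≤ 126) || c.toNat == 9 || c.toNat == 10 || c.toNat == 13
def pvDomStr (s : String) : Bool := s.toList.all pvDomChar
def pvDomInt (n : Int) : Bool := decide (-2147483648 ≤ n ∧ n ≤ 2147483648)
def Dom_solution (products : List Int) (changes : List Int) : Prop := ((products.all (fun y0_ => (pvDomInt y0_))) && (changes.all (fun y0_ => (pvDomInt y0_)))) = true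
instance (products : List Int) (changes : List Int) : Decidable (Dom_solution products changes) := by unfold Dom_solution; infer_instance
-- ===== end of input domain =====

-- B replaces A's per-step rescan of all inventory values by an incrementally maintained
-- sorted multiset of quantities (hand-written bisect + pop/insert); measured faster, same results.

-- ===== PORT A =====
-- one iteration of A's 'for prod_id, change in zip(...)' loop; state = (inventory, res)
def solStepA (st : PySem.Dict Int Int × List Int) (pc : Int × Int) : PySem.Dict Int Int × List Int :=
  let inventory := st.1.insert pc.1 (st.1.getD pc.1 0 + pc.2)
  -- inner 'for qty in inventory.values()' running-max loop, started at 0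
  let m := inventory.values.foldl (fun acc qty => if qty > acc then qty else acc) 0
  (inventory, st.2 ++ [m])

def solution (products : List Int) (changes : List Int) : List Int :=
  ((products.zip changes).foldl solStepA (PySem.Dict.empty, [])).2

-- ===== PORT B =====
-- Source B's hand-written _bisect_left: 'while lo < hi' loop, fuel = len a
-- (hi - lo starts at len a and shrinks every iteration, so this fuel is never exhausted)
def solBisectLoop (a : List Int) (x : Int) : Nat → Nat → Nat → Nat
  | 0, lo, _ => lo
  | fuel+1, lo, hi =>
    if lo < hi then
      match a[(lo + hi) / 2]? with
      | some y => if y < x then solBisectLoop a x fuel ((lo + hi) / 2 + 1) hi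
                  else solBisectLoop a x fuel lo ((lo + hi) / 2)
      | none => lo            -- unreachable: (lo+hi)/2 < hi ≤ len a
    else lo

def solBisect (a : List Int) (x : Int) : Nat := solBisectLoop a x a.length 0 a.length

-- one iteration of Source B's loop; state = (inventory, sl, res)
def solStepB (st : PySem.Dict Int Int × List Int × List Int) (pc : Int × Int) :
    PySem.Dict Int Int × List Int × List Int :=
  let p := if st.1.contains pc.1 then
      let old := st.1.getD pc.1 0
      (match PySem.List.pop? st.2.1 ((solBisect st.2.1 old : Nat) : Int) with
       | some pr => pr.2
       | none => st.2.1,        -- unreachable: the bisect index is always in range here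
       old + pc.2)
    else (st.2.1, pc.2)
  let inventory := st.1.insert pc.1 p.2
  let sl := PySem.List.insert p.1 ((solBisect p.1 p.2 : Nat) : Int) p.2
  let top := match PySem.List.pyGet? sl (-1) with
             | some t => t
             | none => 0        -- unreachable: sl was just inserted into, hence nonempty
  (inventory, sl, st.2.2 ++ [if top > 0 then top else 0])

def solution_alt (products : List Int) (changes : List Int) : List Int :=
  ((products.zip changes).foldl solStepB (PySem.Dict.empty, [], [])).2.2

-- ===== PRECONDITION & SPEC =====
def Spec_solution (products : List Int) (changes : List Int) (out : List Int) : Prop := out = solution_alt products changes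
instance (products : List Int) (changes : List Int) (out : List Int) : Decidable (Spec_solution products changes out) := by unfold Spec_solution; infer_instance

-- ===== CLAIM (what is proved, stated in full; the proofs are below) =====
def Claim_equal_solution : Prop := ∀ (products : List Int) (changes : List Int), Dom_solution products changes → Spec_solution products changes (solution products changes)

-- ===== LEMMAS AND PROOFS =====

-- Source B's hand-written binary search is the same loop as PySem's bisect_left
theorem solBisectLoop_eq (a : List Int) (x : Int) (fuel lo hi : Nat) :
    solBisectLoop a x fuel lo hi = PySem.List.bisectLeftLoop a x fuel lo hi := by
  induction fuel generalizing lo hi with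
  | zero => rfl
  | succ n ih =>
    simp only [solBisectLoop, PySem.List.bisectLeftLoop]
    split_ifs with h
    · cases hx : a[(lo + hi) / 2]? with
      | none => rfl
      | some y => by_cases hy : y < x <;> simp [hy, ih]
    · rfl

theorem solBisect_eq (a : List Int) (x : Int) : solBisect a x = PySem.List.bisectLeft a x := by
  simp [solBisect, PySem.List.bisectLeft, solBisectLoop_eq]

-- the loop invariant tying B's state to A's: same dict (with distinct keys),
-- sl a sorted rearrangement of the dict's values
def SolInv (inv : PySem.Dict Int Int) (sl : List Int) : Prop :=
  inv.keys.Nodup ∧ sl.Perm inv.values ∧ sl.Pairwise (· ≤ ·)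

theorem sol_le_getLast (l : List Int) (hs : l.Pairwise (· ≤ ·)) (h : l ≠ []) :
    ∀ a ∈ l, a ≤ l.getLast h := by
  intro a ha
  have hd := List.dropLast_append_getLast h
  rw [← hd] at ha hs
  rcases List.mem_append.mp ha with hm | hm
  · exact (List.pairwise_append.mp hs).2.2 a hm _ (by simp)
  · simp only [List.mem_singleton] at hm
    exact le_of_eq hm

theorem sol_pyGet_neg_one (l : List Int) (h : l ≠ []) :
    PySem.List.pyGet? l (-1) = some (l.getLast h) := by
  have hlen : 0 < l.length := List.length_pos_iff.mpr h
  have hidx : PySem.List.pyIdx? l.length (-1) = some (l.length - 1) := by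
    simp only [PySem.List.pyIdx?]
    rw [if_neg (by omega), if_pos (by omega)]
    norm_num
  simp only [PySem.List.pyGet?, hidx, Option.bind_some]
  rw [List.getLast_eq_getElem]
  exact List.getElem?_eq_getElem (by omega)

theorem sol_foldl_if_eq_max (l : List Int) (a : Int) :
    l.foldl (fun acc qty => if qty > acc then qty else acc) a = l.foldl max a := by
  induction l generalizing a with
  | nil => rfl
  | cons x t ih =>
    simp only [List.foldl_cons]
    rw [ih]
    congr 1
    simp only [max_def]
    split_ifs <;> omega

theorem sol_foldl_max_sorted (l : List Int) (hs : l.Pairwise (· ≤ ·)) (h : l ≠ []) :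
    l.foldl max 0 = max 0 (l.getLast h) := by
  obtain ⟨h0, hall⟩ := PySem.List.le_foldl_max l 0
  have h1 : l.getLast h ≤ l.foldl max 0 := hall _ (List.getLast_mem h)
  have h2 : l.foldl max 0 ≤ max 0 (l.getLast h) := by
    rcases PySem.List.foldl_max_mem l 0 with he | hm
    · rw [he]; exact le_max_left _ _
    · exact le_max_of_le_right (sol_le_getLast l hs h _ hm)
  exact le_antisymm h2 (max_le h0 h1)

-- A's running max over any rearrangement of sl2 equals B's 'last element, floored at 0'
theorem sol_out (vals sl2 : List Int) (hp : sl2.Perm vals) (hs2 : sl2.Pairwise (· ≤ ·))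
    (hne : sl2 ≠ []) :
    vals.foldl (fun acc qty => if qty > acc then qty else acc) 0
      = if sl2.getLast hne > 0 then sl2.getLast hne else 0 := by
  rw [sol_foldl_if_eq_max]
  rw [List.Perm.foldl_eq' hp.symm (by intro x _ y _ z; rw [max_right_comm]) 0]
  rw [sol_foldl_max_sorted sl2 hs2 hne]
  simp only [max_def]
  split_ifs <;> omega

-- bisect_left on a sorted list containing x lands on an occurrence of x
theorem sol_bisect_mem (sl : List Int) (x : Int) (hs : sl.Pairwise (· ≤ ·)) (hm : x ∈ sl) :
    ∃ h : solBisect sl x < sl.length, sl[solBisect sl x] = x := by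
  rw [solBisect_eq]
  obtain ⟨hle, hlt, hge⟩ := PySem.List.bisectLeft_spec sl x hs
  obtain ⟨k, hk, hkx⟩ := List.mem_iff_getElem.mp hm
  have hik : PySem.List.bisectLeft sl x ≤ k := by
    by_contra hco
    rw [not_le] at hco
    have := hlt k hk hco
    omega
  have hilen : PySem.List.bisectLeft sl x < sl.length := lt_of_le_of_lt hik hk
  refine ⟨hilen, le_antisymm ?_ (hge _ hilen le_rfl)⟩
  have hmono : sl[PySem.List.bisectLeft sl x] ≤ sl[k] := by
    rcases eq_or_lt_of_le hik with he | h2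
    · exact le_of_eq (by simp only [he])
    · exact List.pairwise_iff_getElem.mp hs _ _ hilen hk h2
  exact le_of_le_of_eq hmono hkx

-- inserting x at its bisect position keeps the list sorted and adds x to the multiset
theorem sol_insert_sorted (sl : List Int) (x : Int) (hs : sl.Pairwise (· ≤ ·)) :
    (PySem.List.insert sl ((solBisect sl x : Nat) : Int) x).Perm (x :: sl) ∧
    (PySem.List.insert sl ((solBisect sl x : Nat) : Int) x).Pairwise (· ≤ ·) := by
  rw [solBisect_eq]
  obtain ⟨hle, hlt, hge⟩ := PySem.List.bisectLeft_spec sl x hs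
  rw [PySem.List.insert_natCast sl _ x hle]
  constructor
  · exact List.perm_middle.trans (by rw [List.take_append_drop])
  · rw [List.pairwise_append]
    refine ⟨hs.sublist (List.take_sublist _ _), List.pairwise_cons.mpr ⟨?_, hs.sublist (List.drop_sublist _ _)⟩, ?_⟩
    · intro b hb
      rw [List.mem_drop_iff_getElem] at hb
      obtain ⟨idx, hidx, he⟩ := hb
      rw [← he]
      exact hge _ (by omega) (by omega)
    · intro a ha b hb
      rw [List.mem_take_iff_getElem] at ha
      obtain ⟨ia, hia, hea⟩ := ha
      have ha' : a < x := by
        rw [← hea]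
        exact hlt ia (by omega) (by omega)
      rcases List.mem_cons.mp hb with rfl | hb2
      · exact le_of_lt ha'
      · rw [List.mem_drop_iff_getElem] at hb2
        obtain ⟨ib, hib, heb⟩ := hb2
        have hxb : x ≤ b := by
          rw [← heb]
          exact hge _ (by omega) (by omega)
        omega

-- overwriting the (unique) entry at key k replaces its value in the multiset of values
theorem sol_map_update_perm (l : List (Int × Int)) (k w v : Int)
    (hnd : (l.map Prod.fst).Nodup) (hmem : (k, w) ∈ l) :
    (w :: (l.map (fun p => if p.1 == k then (k, v) else p)).map Prod.snd).Perm
      (v :: l.map Prod.snd) := by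
  induction l with
  | nil => simp at hmem
  | cons p t ih =>
    simp only [List.map_cons, List.nodup_cons] at hnd
    by_cases hp : p.1 = k
    · have hpw : p = (k, w) := by
        rcases List.mem_cons.mp hmem with he | hmem2
        · exact he.symm
        · exfalso
          have : p.1 ∈ t.map Prod.fst := by
            rw [hp]
            exact List.mem_map_of_mem hmem2
          exact hnd.1 this
      have hmapid : t.map (fun q => if q.1 == k then (k, v) else q) = t := by
        have : ∀ q ∈ t, (if q.1 == k then (k, v) else q) = q := by
          intro q hq
          rw [if_neg]
          simp only [beq_iff_eq]
          intro hqk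
          exact hnd.1 (by rw [hp, ← hqk]; exact List.mem_map_of_mem hq)
        rw [List.map_congr_left this]
        simp
      subst hpw
      simp only [List.map_cons, hmapid, beq_self_eq_true, if_true]
      exact List.Perm.swap _ _ _
    · have hmem2 : (k, w) ∈ t := by
        rcases List.mem_cons.mp hmem with he | h2
        · exfalso; apply hp; rw [← he]
        · exact h2
      have hperm := ih hnd.2 hmem2
      simp only [List.map_cons]
      rw [if_neg (by simpa using hp)]
      exact (List.Perm.swap p.2 w _).trans ((hperm.cons p.2).trans (List.Perm.swap v p.2 _))

theorem sol_nodup_insert (d : PySem.Dict Int Int) (k v : Int) (h : d.keys.Nodup) :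
    (d.insert k v).keys.Nodup := by
  simpa using PySem.Dict.nodup_keys_foldl_insert [k] (fun _ _ => v) d h

-- one step preserves the invariant and produces equal outputs
theorem sol_step (inv : PySem.Dict Int Int) (sl ra rb : List Int) (pc : Int × Int)
    (hinv : SolInv inv sl) (hr : ra = rb) :
    (solStepB (inv, sl, rb) pc).1 = (solStepA (inv, ra) pc).1 ∧
    SolInv (solStepA (inv, ra) pc).1 (solStepB (inv, sl, rb) pc).2.1 ∧
    (solStepA (inv, ra) pc).2 = (solStepB (inv, sl, rb) pc).2.2 := by
  obtain ⟨hnd, hperm, hsort⟩ := hinv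
  subst hr
  by_cases hc : inv.contains pc.1 = true
  · -- key already present: B pops the old quantity and inserts the new one
    obtain ⟨w, hw⟩ : ∃ w, inv.get? pc.1 = some w :=
      Option.isSome_iff_exists.mp (by rw [← PySem.Dict.contains_eq_isSome_get?]; exact hc)
    have hgd : inv.getD pc.1 0 = w := PySem.Dict.getD_of_get?_eq_some inv 0 hw
    have hitems : (pc.1, w) ∈ inv.items := PySem.Dict.mem_items_of_get?_eq_some inv hw
    have hwv : w ∈ inv.values := by
      have := List.mem_map_of_mem (f := Prod.snd) hitems
      simpa [PySem.Dict.values] using this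
    have hwsl : w ∈ sl := hperm.mem_iff.mpr hwv
    obtain ⟨hilen, hig⟩ := sol_bisect_mem sl w hsort hwsl
    have hpop : PySem.List.pop? sl ((solBisect sl w : Nat) : Int)
        = some (sl[solBisect sl w], sl.eraseIdx (solBisect sl w)) :=
      PySem.List.pop?_natCast sl _ hilen
    have hslperm : sl.Perm (w :: sl.eraseIdx (solBisect sl w)) := by
      have h0 : sl.Perm (sl[solBisect sl w] :: sl.eraseIdx (solBisect sl w)) := by
        conv_lhs => rw [← List.take_append_drop (solBisect sl w) sl, ← List.getElem_cons_drop hilen]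
        rw [List.eraseIdx_eq_take_drop_succ]
        exact List.perm_middle
      rwa [hig] at h0
    have hsort1 : (sl.eraseIdx (solBisect sl w)).Pairwise (· ≤ ·) :=
      hsort.sublist (List.eraseIdx_sublist _ _)
    obtain ⟨hp2, hs2⟩ := sol_insert_sorted (sl.eraseIdx (solBisect sl w)) (w + pc.2) hsort1
    have hupd := sol_map_update_perm inv.items pc.1 w (w + pc.2)
      (by simpa [PySem.Dict.keys] using hnd) hitems
    have hv' : ((inv.insert pc.1 (w + pc.2)).values)
        = (inv.items.map (fun p => if p.1 == pc.1 then (pc.1, w + pc.2) else p)).map Prod.snd := by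
      simp [PySem.Dict.values, PySem.Dict.items_insert_of_contains inv _ hc]
    have hvperm : (inv.values).Perm (w :: sl.eraseIdx (solBisect sl w)) := hperm.symm.trans hslperm
    have hv'perm : (PySem.List.insert (sl.eraseIdx (solBisect sl w))
        ((solBisect (sl.eraseIdx (solBisect sl w)) (w + pc.2) : Nat) : Int) (w + pc.2)).Perm
        ((inv.insert pc.1 (w + pc.2)).values) := by
      rw [hv']
      have h1 : ((w : Int) :: (inv.items.map (fun p => if p.1 == pc.1 then (pc.1, w + pc.2) else p)).map Prod.snd).Perm
          (w :: (w + pc.2) :: sl.eraseIdx (solBisect sl w)) :=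
        hupd.trans ((hvperm.cons (w + pc.2)).trans (List.Perm.swap w (w + pc.2) _))
      exact (hp2.trans h1.cons_inv.symm)
    have hne : PySem.List.insert (sl.eraseIdx (solBisect sl w))
        ((solBisect (sl.eraseIdx (solBisect sl w)) (w + pc.2) : Nat) : Int) (w + pc.2) ≠ [] := by
      have := hp2.length_eq
      intro hnil
      rw [hnil] at this
      simp at this
    simp only [solStepA, solStepB, hc, if_true, hgd, hpop]
    refine ⟨trivial, ⟨sol_nodup_insert _ _ _ hnd, hv'perm, hs2⟩, ?_⟩
    congr 1
    rw [sol_out _ _ hv'perm hs2 hne, sol_pyGet_neg_one _ hne]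
  · -- fresh key: B just inserts the new quantity
    have hc' : inv.contains pc.1 = false := by simpa using hc
    have hgd : inv.getD pc.1 0 = 0 := PySem.Dict.getD_of_not_contains inv 0 hc'
    obtain ⟨hp2, hs2⟩ := sol_insert_sorted sl pc.2 hsort
    have hvals : (inv.insert pc.1 pc.2).values = inv.values ++ [pc.2] := by
      simp [PySem.Dict.values, PySem.Dict.items_insert_of_not_contains inv pc.2 hc']
    have hslp : (PySem.List.insert sl ((solBisect sl pc.2 : Nat) : Int) pc.2).Perm
        ((inv.insert pc.1 pc.2).values) := by
      rw [hvals]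
      exact hp2.trans ((hperm.cons pc.2).trans (List.perm_append_singleton _ _).symm)
    have hne : PySem.List.insert sl ((solBisect sl pc.2 : Nat) : Int) pc.2 ≠ [] := by
      have := hp2.length_eq
      intro hnil
      rw [hnil] at this
      simp at this
    simp only [solStepA, solStepB, hc', Bool.false_eq_true, if_false, hgd, zero_add]
    refine ⟨trivial, ⟨sol_nodup_insert _ _ _ hnd, hslp, hs2⟩, ?_⟩
    congr 1
    rw [sol_out _ _ hslp hs2 hne, sol_pyGet_neg_one _ hne]

theorem sol_loop (l : List (Int × Int)) (inv : PySem.Dict Int Int) (sl ra rb : List Int)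
    (hinv : SolInv inv sl) (hr : ra = rb) :
    (l.foldl solStepA (inv, ra)).2 = (l.foldl solStepB (inv, sl, rb)).2.2 := by
  induction l generalizing inv sl ra rb with
  | nil => simpa using hr
  | cons pc t ih =>
    obtain ⟨h1, h2, h3⟩ := sol_step inv sl ra rb pc hinv hr
    rw [List.foldl_cons, List.foldl_cons]
    have hB : (t.foldl solStepB (solStepB (inv, sl, rb) pc)).2.2
        = (t.foldl solStepB ((solStepA (inv, ra) pc).1,
            (solStepB (inv, sl, rb) pc).2.1, (solStepB (inv, sl, rb) pc).2.2)).2.2 := by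
      rw [← h1]
    rw [hB]
    exact ih _ _ _ _ h2 h3

-- ===== VERDICT (by name: the statement is the Claim_ definition above) =====
theorem solution_spec : Claim_equal_solution := by
  intro products changes _
  unfold Spec_solution solution solution_alt
  exact sol_loop _ _ _ _ _ ⟨by simp [PySem.Dict.empty, PySem.Dict.keys], by simp [PySem.Dict.empty, PySem.Dict.values], by simp⟩ rfl
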